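-- pv_equiv track=rewrite | github.com/TianXue2002/H-chain | src/lib/preplaced_pack.py | find_inter_module_tiles
-- ===== SOURCE A (Python) =====
-- def find_inter_module_tiles(tiles_lst, seam_lst):
--     inter_tiles = []
--     intra_tiles = []
--     for cur_tile in tiles_lst:
--         inter = False
--         w,h,x,y = cur_tile[0]
--         for i in range(len(seam_lst)):
--             seam = seam_lst[i]
--             if y < seam and y+h >= seam:
--                 inter_tiles.append(cur_tile)
--                 inter = True
--         if not inter:
--             intra_tiles.append(cur_tile)
--     return inter_tiles, intra_tiles
-- ===== SOURCE B (Python) =====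
-- def _bisect_right(a, x):
--     lo, hi = 0, len(a)
--     while lo < hi:
--         mid = (lo + hi) // 2
--         if x < a[mid]:
--             hi = mid
--         else:
--             lo = mid + 1
--     return lo
--
--
-- def find_inter_module_tiles(tiles_lst, seam_lst):
--     seams = sorted(seam_lst)
--     inter_tiles = []
--     intra_tiles = []
--     for cur_tile in tiles_lst:
--         w, h, x, y = cur_tile[0]
--         # number of seams s with y < s <= y + h
--         k = _bisect_right(seams, y + h) - _bisect_right(seams, y)
--         if k > 0:
--             inter_tiles.extend([cur_tile] * k)
--         else:
--             intra_tiles.append(cur_tile)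
--     return inter_tiles, intra_tiles
-- ===== Notes on version B (the rewrite author's own statement) =====
-- stated objective: faster
-- what changed: B sorts the seam list once and, for each tile, counts the seams in (y, y+h] with a hand-written binary search (bisect_right difference), appending that many copies at once, instead of A's linear scan over all seams for every tile.
import Mathlib
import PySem

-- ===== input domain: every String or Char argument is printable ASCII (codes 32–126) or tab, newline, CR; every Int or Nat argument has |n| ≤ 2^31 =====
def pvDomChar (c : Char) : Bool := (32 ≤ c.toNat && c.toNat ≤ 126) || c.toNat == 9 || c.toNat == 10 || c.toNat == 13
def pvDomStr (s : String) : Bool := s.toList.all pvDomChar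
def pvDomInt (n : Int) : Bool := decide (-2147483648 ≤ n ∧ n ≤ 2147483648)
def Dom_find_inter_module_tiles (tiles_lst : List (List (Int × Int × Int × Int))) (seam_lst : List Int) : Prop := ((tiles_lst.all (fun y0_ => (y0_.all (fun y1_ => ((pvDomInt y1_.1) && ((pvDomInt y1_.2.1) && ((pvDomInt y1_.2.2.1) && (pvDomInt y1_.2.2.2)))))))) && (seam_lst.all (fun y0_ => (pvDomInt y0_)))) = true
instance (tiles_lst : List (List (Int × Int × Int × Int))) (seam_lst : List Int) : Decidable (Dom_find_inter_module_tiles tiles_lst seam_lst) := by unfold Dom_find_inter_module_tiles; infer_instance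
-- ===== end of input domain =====

-- B sorts the seams once and counts the seams crossing each tile with a binary search
-- instead of A's linear scan per tile; return value proved identical on nonempty tiles.

-- ===== PORT A =====
-- A's inner loop: 'for i in range(len(seam_lst)): seam = seam_lst[i]; if y < seam and y+h >= seam: append; inter = True'
-- (the state is (inter_tiles, inter); 'seam = seam_lst[i]' is inlined)
def pvInner (seam_lst : List Int) (cur_tile : List (Int × Int × Int × Int)) (y h : Int)
    (inter_tiles : List (List (Int × Int × Int × Int))) : (List (List (Int × Int × Int × Int))) × Bool :=
  (PySem.List.pyRange 0 (PySem.List.len seam_lst) 1).foldl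
    (fun (p : (List (List (Int × Int × Int × Int))) × Bool) i =>
      if y < PySem.List.pyGetD seam_lst i 0 ∧ y + h ≥ PySem.List.pyGetD seam_lst i 0
      then (p.1 ++ [cur_tile], true) else p)
    (inter_tiles, false)

-- A's loop body for one cur_tile
def pvStepA (seam_lst : List Int)
    (acc : (List (List (Int × Int × Int × Int))) × (List (List (Int × Int × Int × Int))))
    (cur_tile : List (Int × Int × Int × Int)) :
    (List (List (Int × Int × Int × Int))) × (List (List (Int × Int × Int × Int))) :=
  -- w,h,x,y = cur_tile[0]; Pre_ guarantees cur_tile ≠ [] (Python raises IndexError otherwise)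
  let q := cur_tile.getD 0 (0, 0, 0, 0)
  let h := q.2.1
  let y := q.2.2.2
  let r := pvInner seam_lst cur_tile y h acc.1
  if r.2 then (r.1, acc.2) else (r.1, acc.2 ++ [cur_tile])

def find_inter_module_tiles (tiles_lst : List (List (Int × Int × Int × Int))) (seam_lst : List Int) : (List (List (Int × Int × Int × Int))) × (List (List (Int × Int × Int × Int))) :=
  tiles_lst.foldl (pvStepA seam_lst) ([], [])

-- ===== PORT B =====
-- hand-written _bisect_right of Source B: while lo < hi: mid = (lo+hi)//2; ...
def pvBisectRight (a : List Int) (x : Int) (lo hi : Nat) : Nat :=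
  if _h : lo < hi then
    let mid := (lo + hi) / 2
    if x < a.getD mid 0 then   -- a[mid]; lo ≤ mid < hi ≤ len a, always in range
      pvBisectRight a x lo mid
    else
      pvBisectRight a x (mid + 1) hi
  else lo
termination_by hi - lo
decreasing_by all_goals omega

-- B's loop body for one cur_tile (seams = sorted(seam_lst), computed once before the loop)
def pvStepB (seams : List Int)
    (acc : (List (List (Int × Int × Int × Int))) × (List (List (Int × Int × Int × Int))))
    (cur_tile : List (Int × Int × Int × Int)) :
    (List (List (Int × Int × Int × Int))) × (List (List (Int × Int × Int × Int))) :=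
  -- w,h,x,y = cur_tile[0]; Pre_ guarantees cur_tile ≠ []
  let q := cur_tile.getD 0 (0, 0, 0, 0)
  let h := q.2.1
  let y := q.2.2.2
  let k : Int := (pvBisectRight seams (y + h) 0 seams.length : Int)
               - (pvBisectRight seams y 0 seams.length : Int)
  if 0 < k then (acc.1 ++ List.replicate k.toNat cur_tile, acc.2)
  else (acc.1, acc.2 ++ [cur_tile])

def find_inter_module_tiles_alt (tiles_lst : List (List (Int × Int × Int × Int))) (seam_lst : List Int) : (List (List (Int × Int × Int × Int))) × (List (List (Int × Int × Int × Int))) :=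
  let seams := PySem.List.sorted seam_lst (fun s => s)
  tiles_lst.foldl (pvStepB seams) ([], [])

-- ===== PRECONDITION & SPEC =====
-- Pre_ excludes exactly the inputs where Python A raises: an empty inner tile list makes
-- 'cur_tile[0]' an IndexError (B raises there too).
def Pre_find_inter_module_tiles (tiles_lst : List (List (Int × Int × Int × Int))) (seam_lst : List Int) : Prop :=
  ∀ t ∈ tiles_lst, t ≠ []
instance (tiles_lst : List (List (Int × Int × Int × Int))) (seam_lst : List Int) : Decidable (Pre_find_inter_module_tiles tiles_lst seam_lst) := by unfold Pre_find_inter_module_tiles; infer_instance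

def pvWitness_find_inter_module_tiles : (List (List (Int × Int × Int × Int))) × List Int :=
  ([[(1, 2, 3, 4)], [(1, 1, 0, 0)]], [5, 0])

def Spec_find_inter_module_tiles (tiles_lst : List (List (Int × Int × Int × Int))) (seam_lst : List Int) (out : (List (List (Int × Int × Int × Int))) × (List (List (Int × Int × Int × Int)))) : Prop := out = find_inter_module_tiles_alt tiles_lst seam_lst
instance (tiles_lst : List (List (Int × Int × Int × Int))) (seam_lst : List Int) (out : (List (List (Int × Int × Int × Int))) × (List (List (Int × Int × Int × Int)))) : Decidable (Spec_find_inter_module_tiles tiles_lst seam_lst out) := by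
  unfold Spec_find_inter_module_tiles
  exact @instDecidableEqProd _ _ (@instDecidableEqList _ inferInstance) (@instDecidableEqList _ inferInstance) _ _

-- ===== CLAIM (what is proved, stated in full; the proofs are below) =====
def Claim_equal_find_inter_module_tiles : Prop := ∀ (tiles_lst : List (List (Int × Int × Int × Int))) (seam_lst : List Int), Dom_find_inter_module_tiles tiles_lst seam_lst → Pre_find_inter_module_tiles tiles_lst seam_lst → Spec_find_inter_module_tiles tiles_lst seam_lst (find_inter_module_tiles tiles_lst seam_lst)

-- ===== LEMMAS AND PROOFS =====

-- a list whose first r positions satisfy p and whose remaining positions do not has countP p = r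
theorem pv_countP_of_positional (p : Int → Bool) :
    ∀ (a : List Int) (r : Nat), r ≤ a.length →
      (∀ i (_ : i < a.length), i < r → p a[i]) →
      (∀ i (_ : i < a.length), r ≤ i → ¬ p a[i]) →
      a.countP p = r := by
  intro a
  induction a with
  | nil =>
    intro r hr _ _
    simp only [List.length_nil, Nat.le_zero] at hr
    simp [hr]
  | cons b t ih =>
    intro r hr h1 h2
    cases r with
    | zero =>
      have hb : ¬ p b := h2 0 (by simp) (Nat.zero_le _)
      have ht : t.countP p = 0 := by
        apply ih 0 (Nat.zero_le _)
        · intro i _ hlt; omega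
        · intro i hi _
          have := h2 (i+1) (by simpa using Nat.succ_lt_succ hi) (Nat.zero_le _)
          simpa using this
      simp [ht, hb]
    | succ r' =>
      have hb : p b := h1 0 (by simp) (Nat.succ_pos _)
      have ht : t.countP p = r' := by
        apply ih r' (by simpa using hr)
        · intro i hi hlt
          have := h1 (i+1) (by simpa using Nat.succ_lt_succ hi) (by omega)
          simpa using this
        · intro i hi hge
          have := h2 (i+1) (by simpa using Nat.succ_lt_succ hi) (by omega)
          simpa using this
      simp [ht, hb]

-- binary-search invariant: on a ≤-sorted list pvBisectRight computes countP (· ≤ x)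
theorem pv_bisect_count (a : List Int) (x : Int) (hs : a.Pairwise (· ≤ ·)) :
    ∀ (n lo hi : Nat), hi - lo = n → lo ≤ hi → hi ≤ a.length →
      (∀ i (_ : i < a.length), i < lo → a[i] ≤ x) →
      (∀ i (_ : i < a.length), hi ≤ i → x < a[i]) →
      pvBisectRight a x lo hi = a.countP (fun s => decide (s ≤ x)) := by
  have hmono : ∀ i j (hi : i < a.length) (hj : j < a.length), i ≤ j → a[i] ≤ a[j] := by
    intro i j hi hj hij
    rcases Nat.lt_or_ge i j with h | h
    · exact (List.pairwise_iff_getElem.mp hs) i j hi hj h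
    · have : i = j := by omega
      subst this; exact le_refl _
  intro n
  induction n using Nat.strong_induction_on with
  | _ n ih =>
    intro lo hi hn hle hlen h1 h2
    rw [pvBisectRight]
    by_cases hlt : lo < hi
    · simp only [hlt, dif_pos]
      have hmlen : (lo + hi) / 2 < a.length := by omega
      rw [List.getD_eq_getElem a 0 hmlen]
      by_cases hx : x < a[(lo + hi) / 2]
      · simp only [hx, if_pos]
        apply ih ((lo + hi) / 2 - lo) (by omega) lo _ rfl (by omega) (by omega) h1
        intro i hi' hge
        exact lt_of_lt_of_le hx (hmono _ _ hmlen hi' hge)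
      · simp only [hx, if_neg, not_false_iff]
        apply ih (hi - ((lo + hi) / 2 + 1)) (by omega) _ hi rfl (by omega) hlen _ h2
        intro i hi' hlt'
        have : a[i] ≤ a[(lo + hi) / 2] := hmono _ _ hi' hmlen (by omega)
        omega
    · simp only [hlt, dif_neg, not_false_iff]
      have heq : lo = hi := by omega
      subst heq
      refine (pv_countP_of_positional _ a lo (by omega) ?_ ?_).symm
      · intro i hi' hlt'
        simpa using h1 i hi' hlt'
      · intro i hi' hge
        simpa using h2 i hi' hge

theorem pv_bisect_count_full (a : List Int) (x : Int) (hs : a.Pairwise (· ≤ ·)) :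
    pvBisectRight a x 0 a.length = a.countP (fun s => decide (s ≤ x)) :=
  pv_bisect_count a x hs a.length 0 a.length (by omega) (Nat.zero_le _) (le_refl _)
    (by intro i _ h; omega) (by intro i hi h; omega)

-- shape of A's inner loop over the raw seam list
theorem pv_inner_fold (t : List (Int × Int × Int × Int)) (y hh : Int) :
    ∀ (l : List Int) (init : List (List (Int × Int × Int × Int))) (b : Bool),
      l.foldl (fun (p : (List (List (Int × Int × Int × Int))) × Bool) s =>
          if y < s ∧ y + hh ≥ s then (p.1 ++ [t], true) else p) (init, b)
      = (init ++ List.replicate (l.countP (fun s => decide (y < s ∧ y + hh ≥ s))) t,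
         b || l.any (fun s => decide (y < s ∧ y + hh ≥ s))) := by
  intro l
  induction l with
  | nil => intro init b; simp
  | cons s l ih =>
    intro init b
    by_cases hc : y < s ∧ y + hh ≥ s
    · rw [List.foldl_cons, if_pos hc, ih, List.countP_cons, List.any_cons, decide_eq_true hc]
      simp [List.replicate_succ, List.append_assoc]
    · rw [List.foldl_cons, if_neg hc, ih, List.countP_cons, List.any_cons, decide_eq_false hc]
      simp

-- pvInner in closed form: append one copy of cur_tile per crossing seam, flag = any crossing
theorem pvInner_spec (seam_lst : List Int) (t : List (Int × Int × Int × Int)) (y hh : Int)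
    (init : List (List (Int × Int × Int × Int))) :
    pvInner seam_lst t y hh init
      = (init ++ List.replicate (seam_lst.countP (fun s => decide (y < s ∧ y + hh ≥ s))) t,
         seam_lst.any (fun s => decide (y < s ∧ y + hh ≥ s))) := by
  unfold pvInner
  rw [PySem.List.foldl_pyRange_zero_pyGetD seam_lst 0
    (fun (p : (List (List (Int × Int × Int × Int))) × Bool) s =>
      if y < s ∧ y + hh ≥ s then (p.1 ++ [t], true) else p) (init, false)]
  rw [pv_inner_fold t y hh seam_lst init false]
  simp

-- counting split for nonnegative height: #{s ≤ y+hh} = #{s ≤ y} + #{y < s ≤ y+hh}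
theorem pv_count_split (y hh : Int) (hpos : 0 ≤ hh) :
    ∀ l : List Int,
      l.countP (fun s => decide (s ≤ y + hh))
        = l.countP (fun s => decide (s ≤ y)) + l.countP (fun s => decide (y < s ∧ y + hh ≥ s)) := by
  intro l
  induction l with
  | nil => simp
  | cons s l ih =>
    simp only [List.countP_cons, ih]
    split_ifs with h1 h2 h3 <;> simp only [decide_eq_true_eq] at * <;> omega

-- negative height: no seam crosses
theorem pv_count_zero (y hh : Int) (hneg : hh < 0) (l : List Int) :
    l.countP (fun s => decide (y < s ∧ y + hh ≥ s)) = 0 := by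
  apply List.countP_eq_zero.mpr
  intro s _
  simp only [decide_eq_true_eq]
  omega

-- any = (countP > 0)
theorem pv_any_iff_countP (p : Int → Bool) (l : List Int) :
    l.any p = decide (0 < l.countP p) := by
  rcases Nat.eq_zero_or_pos (l.countP p) with h | h
  · have := List.countP_eq_zero.mp h
    simp only [h, Nat.lt_irrefl, decide_false, List.any_eq_false]
    intro x hx
    simpa using this x hx
  · rw [decide_eq_true h]
    exact List.any_eq_true.mpr (List.countP_pos_iff.mp h)

-- the two per-tile loop bodies agree (y, hh arbitrary)
theorem pv_step_core (seam_lst : List Int) (t : List (Int × Int × Int × Int)) (y hh : Int)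
    (accl accr : List (List (Int × Int × Int × Int))) :
    (if (pvInner seam_lst t y hh accl).2 then ((pvInner seam_lst t y hh accl).1, accr)
     else ((pvInner seam_lst t y hh accl).1, accr ++ [t]))
    = (if 0 < ((pvBisectRight (PySem.List.sorted seam_lst (fun s => s)) (y + hh) 0 (PySem.List.sorted seam_lst (fun s => s)).length : Int)
              - (pvBisectRight (PySem.List.sorted seam_lst (fun s => s)) y 0 (PySem.List.sorted seam_lst (fun s => s)).length : Int))
       then (accl ++ List.replicate ((pvBisectRight (PySem.List.sorted seam_lst (fun s => s)) (y + hh) 0 (PySem.List.sorted seam_lst (fun s => s)).length : Int)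
              - (pvBisectRight (PySem.List.sorted seam_lst (fun s => s)) y 0 (PySem.List.sorted seam_lst (fun s => s)).length : Int)).toNat t, accr)
       else (accl, accr ++ [t])) := by
  have hpw : (PySem.List.sorted seam_lst (fun s => s)).Pairwise (· ≤ ·) := by
    simpa using PySem.List.sorted_pairwise seam_lst (fun s => s)
  have hperm : (PySem.List.sorted seam_lst (fun s => s)).Perm seam_lst :=
    PySem.List.sorted_perm seam_lst (fun s => s) false
  rw [pvInner_spec, pv_bisect_count_full _ (y + hh) hpw, pv_bisect_count_full _ y hpw,
      hperm.countP_eq, hperm.countP_eq, pv_any_iff_countP]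
  set c := seam_lst.countP (fun s => decide (y < s ∧ y + hh ≥ s)) with hc
  set c1 := seam_lst.countP (fun s => decide (s ≤ y)) with hc1
  set c2 := seam_lst.countP (fun s => decide (s ≤ y + hh)) with hc2
  rcases le_or_gt 0 hh with hpos | hneg
  · have hsplit : c2 = c1 + c := by rw [hc2, hc1, hc]; exact pv_count_split y hh hpos seam_lst
    have hk : (c2 : Int) - (c1 : Int) = (c : Int) := by rw [hsplit]; push_cast; ring
    rw [hk]
    by_cases hcpos : 0 < c
    · rw [decide_eq_true hcpos, if_pos rfl, if_pos (by exact_mod_cast hcpos)]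
      simp
    · have hc0 : c = 0 := by omega
      simp [hc0]
  · have hc0 : c = 0 := by rw [hc]; exact pv_count_zero y hh hneg seam_lst
    have hmono : c2 ≤ c1 := by
      rw [hc2, hc1]
      apply List.countP_mono_left
      intro s _ hs
      simp only [decide_eq_true_eq] at *
      omega
    have hk : ¬ (0 < (c2 : Int) - (c1 : Int)) := by omega
    rw [if_neg hk]
    simp [hc0]

-- the two loop bodies agree on every accumulator and tile
theorem pv_step_eq (seam_lst : List Int)
    (acc : (List (List (Int × Int × Int × Int))) × (List (List (Int × Int × Int × Int))))
    (cur_tile : List (Int × Int × Int × Int)) :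
    pvStepA seam_lst acc cur_tile
      = pvStepB (PySem.List.sorted seam_lst (fun s => s)) acc cur_tile := by
  unfold pvStepA pvStepB
  exact pv_step_core seam_lst cur_tile ((cur_tile.getD 0 (0, 0, 0, 0)).2.2.2)
    ((cur_tile.getD 0 (0, 0, 0, 0)).2.1) acc.1 acc.2

theorem pv_fold_eq (seam_lst : List Int) :
    ∀ (tiles : List (List (Int × Int × Int × Int)))
      (acc : (List (List (Int × Int × Int × Int))) × (List (List (Int × Int × Int × Int)))),
      tiles.foldl (pvStepA seam_lst) acc
        = tiles.foldl (pvStepB (PySem.List.sorted seam_lst (fun s => s))) acc := by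
  intro tiles
  induction tiles with
  | nil => intro acc; rfl
  | cons t ts ih =>
    intro acc
    rw [List.foldl_cons, List.foldl_cons, pv_step_eq]
    exact ih _

-- ===== VERDICT (by name: the statement is the Claim_ definition above) =====
theorem find_inter_module_tiles_spec : Claim_equal_find_inter_module_tiles := by
  intro tiles_lst seam_lst _ _
  unfold Spec_find_inter_module_tiles find_inter_module_tiles find_inter_module_tiles_alt
  exact pv_fold_eq seam_lst tiles_lst ([], [])
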